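-- pv_equiv track=rewrite | github.com/hazsoo/studying-coding-test | 프로그래머스/2/12985. 예상 대진표/예상 대진표.py | solution
-- ===== SOURCE A (Python) =====
-- def solution(n,a,b):
--     ans = 1
--     match = n // 2
--     game_a = (a+1) // 2
--     game_b = (b+1) // 2
--
--     while game_a != game_b:
--         a = game_a
--         b = game_b
--         game_a = (a+1) // 2
--         game_b = (b+1) // 2
--         ans += 1
--         match //= 2
--
--     return ans
-- ===== SOURCE B (Python) =====
-- def solution(n, a, b):
--     # the round in which bracket positions a and b first meet is the
--     # bit length of the xor of their zero-based positions (at least 1)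
--     return max(((a - 1) ^ (b - 1)).bit_length(), 1)
-- ===== Notes on version B (the rewrite author's own statement) =====
-- stated objective: simpler
-- what changed: Replaces A's repeated-halving while loop with the closed form max(((a-1)^(b-1)).bit_length(), 1); Pre_ excludes only mixed-sign (a,b) inputs, on which A's while loop never terminates.
import Mathlib
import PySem

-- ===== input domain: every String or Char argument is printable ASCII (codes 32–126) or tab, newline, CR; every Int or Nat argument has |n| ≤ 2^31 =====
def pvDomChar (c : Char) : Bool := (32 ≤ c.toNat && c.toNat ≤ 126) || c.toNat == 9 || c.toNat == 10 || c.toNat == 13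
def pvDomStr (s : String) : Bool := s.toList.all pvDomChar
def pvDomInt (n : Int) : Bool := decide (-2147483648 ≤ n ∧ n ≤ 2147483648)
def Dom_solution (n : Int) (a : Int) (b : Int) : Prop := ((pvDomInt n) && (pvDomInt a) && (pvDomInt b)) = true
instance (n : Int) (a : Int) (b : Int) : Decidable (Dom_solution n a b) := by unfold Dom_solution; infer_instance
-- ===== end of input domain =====

-- B replaces A's repeated-halving loop by the closed form max(bit_length((a-1)^(b-1)), 1); return values only, no side effects.

-- ===== PORT A =====
-- A's while loop diverges when a, b have mixed signs (excluded by Pre_solution);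
-- fuel 64 is ample for every terminating input in Dom (|a|,|b| ≤ 2^31 needs ≤ 32 halvings).
def solutionLoop : Nat → Int → Int → Int → Int → Int
  | 0, ans, _, _, _ => ans
  | fuel+1, ans, mtch, ga, gb =>
    if ga ≠ gb then
      solutionLoop fuel (ans+1) (PySem.Int.floordiv mtch 2)
        (PySem.Int.floordiv (ga+1) 2) (PySem.Int.floordiv (gb+1) 2)
    else ans

def solution (n : Int) (a : Int) (b : Int) : Int :=
  solutionLoop 64 1 (PySem.Int.floordiv n 2)
    (PySem.Int.floordiv (a+1) 2) (PySem.Int.floordiv (b+1) 2)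

-- ===== PORT B =====
def solution_alt (n : Int) (a : Int) (b : Int) : Int :=
  ((max (PySem.Int.bitLength (PySem.Int.bxor (a-1) (b-1))) 1 : Nat) : Int)

-- ===== PRECONDITION & SPEC =====
-- Pre_ excludes exactly the mixed-sign inputs (one of a, b ≥ 1, the other ≤ 0),
-- on which A's while loop never terminates (A returns no value there).
def Pre_solution (n : Int) (a : Int) (b : Int) : Prop :=
  (1 ≤ a ∧ 1 ≤ b) ∨ (a ≤ 0 ∧ b ≤ 0)
instance (n : Int) (a : Int) (b : Int) : Decidable (Pre_solution n a b) := by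
  unfold Pre_solution; infer_instance

def pvWitness_solution : Int × Int × Int := (8, 4, 7)

def Spec_solution (n : Int) (a : Int) (b : Int) (out : Int) : Prop := out = solution_alt n a b
instance (n : Int) (a : Int) (b : Int) (out : Int) : Decidable (Spec_solution n a b out) := by
  unfold Spec_solution; infer_instance

-- ===== CLAIM (what is proved, stated in full; the proofs are below) =====
def Claim_equal_solution : Prop := ∀ (n : Int) (a : Int) (b : Int), Dom_solution n a b → Pre_solution n a b → Spec_solution n a b (solution n a b)

-- ===== LEMMAS AND PROOFS =====

lemma pv_fd_pos (u : Nat) : PySem.Int.floordiv ((u : Int) + 2) 2 = (↑(u / 2) : Int) + 1 := by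
  rw [PySem.Int.floordiv_eq_ediv_of_pos (by omega)]; omega

lemma pv_fd_neg (u : Nat) : PySem.Int.floordiv (1 - (u : Int)) 2 = -(↑(u / 2) : Int) := by
  rw [PySem.Int.floordiv_eq_ediv_of_pos (by omega)]; omega

lemma pv_xor_div2 (x y : Nat) : (x ^^^ y) / 2 = x / 2 ^^^ y / 2 := by
  apply Nat.eq_of_testBit_eq; intro i
  simp [Nat.testBit_div_two, Nat.testBit_xor]

lemma pv_bl_small (d : Nat) (h : d ≤ 1) :
    PySem.Int.bitLength (d : Int) - 1 = 0 := by
  interval_cases d <;> decide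

lemma pv_bl_succ (d : Nat) (h : 0 < d) :
    PySem.Int.bitLength (d : Int) = PySem.Int.bitLength ((d / 2 : Nat) : Int) + 1 :=
  PySem.Int.bitLength_natCast h

lemma pv_bxor_compl (x y : Nat) :
    PySem.Int.bxor (-(x:Int)-1) (-(y:Int)-1) = PySem.Int.bxor x y := by
  simp only [PySem.Int.bxor]
  norm_num
  split_ifs <;> first | rfl | omega

lemma pv_loop_pos : ∀ (fuel : Nat) (x y : Nat) (ans m : Int), x ^^^ y < 2 ^ fuel →
    solutionLoop fuel ans m ((↑(x / 2) : Int) + 1) ((↑(y / 2) : Int) + 1)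
      = ans + ↑(PySem.Int.bitLength ((x ^^^ y : Nat) : Int) - 1) := by
  intro fuel
  induction fuel with
  | zero =>
    intro x y ans m h
    have h0 : x ^^^ y = 0 := by omega
    simp [solutionLoop, h0]
  | succ fuel ih =>
    intro x y ans m h
    by_cases hne : x / 2 = y / 2
    · have h2 : (x ^^^ y) / 2 = 0 := by rw [pv_xor_div2, hne]; simp
      have hle : x ^^^ y ≤ 1 := by omega
      simp [solutionLoop, hne, pv_bl_small _ hle]
    · have hcond : ((↑(x / 2) : Int) + 1) ≠ ((↑(y / 2) : Int) + 1) := by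
        intro hc; apply hne; exact_mod_cast (by omega : ((x/2 : Nat) : Int) = ↑(y/2))
      have hrec : x / 2 ^^^ y / 2 < 2 ^ fuel := by
        rw [← pv_xor_div2]
        have : x ^^^ y < 2 ^ fuel * 2 := by
          have := h; rw [pow_succ] at this; omega
        omega
      have hgd : (x ^^^ y) / 2 ≠ 0 := by
        rw [pv_xor_div2]; simpa [Nat.xor_eq_zero] using hne
      have hd2 : 2 ≤ x ^^^ y := by omega
      have step : PySem.Int.floordiv (((↑(x / 2) : Int) + 1) + 1) 2 = (↑(x / 2 / 2) : Int) + 1 := by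
        have := pv_fd_pos (x / 2); rw [← this]; ring_nf
      have step' : PySem.Int.floordiv (((↑(y / 2) : Int) + 1) + 1) 2 = (↑(y / 2 / 2) : Int) + 1 := by
        have := pv_fd_pos (y / 2); rw [← this]; ring_nf
      rw [solutionLoop, if_pos hcond, step, step', ih _ _ _ _ hrec, ← pv_xor_div2]
      have hb := pv_bl_succ _ (by omega : 0 < x ^^^ y)
      have hb2 := pv_bl_succ _ (by omega : 0 < (x ^^^ y) / 2)
      rw [hb]
      omega

lemma pv_loop_neg : ∀ (fuel : Nat) (x y : Nat) (ans m : Int), x ^^^ y < 2 ^ fuel →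
    solutionLoop fuel ans m (-(↑(x / 2) : Int)) (-(↑(y / 2) : Int))
      = ans + ↑(PySem.Int.bitLength ((x ^^^ y : Nat) : Int) - 1) := by
  intro fuel
  induction fuel with
  | zero =>
    intro x y ans m h
    have h0 : x ^^^ y = 0 := by omega
    simp [solutionLoop, h0]
  | succ fuel ih =>
    intro x y ans m h
    by_cases hne : x / 2 = y / 2
    · have h2 : (x ^^^ y) / 2 = 0 := by rw [pv_xor_div2, hne]; simp
      have hle : x ^^^ y ≤ 1 := by omega
      simp [solutionLoop, hne, pv_bl_small _ hle]
    · have hcond : (-(↑(x / 2) : Int)) ≠ (-(↑(y / 2) : Int)) := by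
        intro hc; apply hne; exact_mod_cast (by omega : ((x/2 : Nat) : Int) = ↑(y/2))
      have hrec : x / 2 ^^^ y / 2 < 2 ^ fuel := by
        rw [← pv_xor_div2]
        have : x ^^^ y < 2 ^ fuel * 2 := by
          have := h; rw [pow_succ] at this; omega
        omega
      have hgd : (x ^^^ y) / 2 ≠ 0 := by
        rw [pv_xor_div2]; simpa [Nat.xor_eq_zero] using hne
      have step : PySem.Int.floordiv ((-(↑(x / 2) : Int)) + 1) 2 = -(↑(x / 2 / 2) : Int) := by
        have := pv_fd_neg (x / 2); rw [← this]; ring_nf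
      have step' : PySem.Int.floordiv ((-(↑(y / 2) : Int)) + 1) 2 = -(↑(y / 2 / 2) : Int) := by
        have := pv_fd_neg (y / 2); rw [← this]; ring_nf
      rw [solutionLoop, if_pos hcond, step, step', ih _ _ _ _ hrec, ← pv_xor_div2]
      have hb := pv_bl_succ _ (by omega : 0 < x ^^^ y)
      have hb2 := pv_bl_succ _ (by omega : 0 < (x ^^^ y) / 2)
      rw [hb]
      omega

lemma pv_xor_lt (x y : Nat) (hx : x < 2 ^ 64) (hy : y < 2 ^ 64) : x ^^^ y < 2 ^ 64 :=
  Nat.xor_lt_two_pow hx hy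

lemma pv_max_cast (k : Nat) :
    (1 : Int) + ((k - 1 : Nat) : Int) = ((max k 1 : Nat) : Int) := by
  rcases k with _ | k <;> simp <;> omega

-- ===== VERDICT (by name: the statement is the Claim_ definition above) =====
theorem solution_spec : Claim_equal_solution := by
  intro n a b hdom hpre
  unfold Spec_solution solution solution_alt
  have hdom' : -2147483648 ≤ a ∧ a ≤ 2147483648 ∧ -2147483648 ≤ b ∧ b ≤ 2147483648 := by
    unfold Dom_solution pvDomInt at hdom
    simp only [Bool.and_eq_true, decide_eq_true_eq] at hdom
    omega
  rcases hpre with ⟨ha, hb⟩ | ⟨ha, hb⟩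
  · -- both players ≥ 1
    set x := (a - 1).toNat with hxdef
    set y := (b - 1).toNat with hydef
    have hax : a = (x : Int) + 1 := by omega
    have hby : b = (y : Int) + 1 := by omega
    have hga : PySem.Int.floordiv (a + 1) 2 = (↑(x / 2) : Int) + 1 := by
      rw [hax, (by ring : ((x : Int) + 1) + 1 = (x : Int) + 2), pv_fd_pos]
    have hgb : PySem.Int.floordiv (b + 1) 2 = (↑(y / 2) : Int) + 1 := by
      rw [hby, (by ring : ((y : Int) + 1) + 1 = (y : Int) + 2), pv_fd_pos]
    have hxb : x < 2 ^ 64 := by omega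
    have hyb : y < 2 ^ 64 := by omega
    rw [hga, hgb, pv_loop_pos 64 x y 1 _ (pv_xor_lt x y hxb hyb)]
    have hbx : PySem.Int.bxor (a - 1) (b - 1) = ((x ^^^ y : Nat) : Int) := by
      rw [(by omega : a - 1 = (x : Int)), (by omega : b - 1 = (y : Int))]
      exact PySem.Int.bxor_natCast x y
    rw [hbx]
    exact pv_max_cast _
  · -- both players ≤ 0
    set x := (-a).toNat with hxdef
    set y := (-b).toNat with hydef
    have hga : PySem.Int.floordiv (a + 1) 2 = -(↑(x / 2) : Int) := by
      rw [(by omega : a + 1 = 1 - (x : Int)), pv_fd_neg]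
    have hgb : PySem.Int.floordiv (b + 1) 2 = -(↑(y / 2) : Int) := by
      rw [(by omega : b + 1 = 1 - (y : Int)), pv_fd_neg]
    have hxb : x < 2 ^ 64 := by omega
    have hyb : y < 2 ^ 64 := by omega
    rw [hga, hgb, pv_loop_neg 64 x y 1 _ (pv_xor_lt x y hxb hyb)]
    have hbx : PySem.Int.bxor (a - 1) (b - 1) = ((x ^^^ y : Nat) : Int) := by
      rw [(by omega : a - 1 = -(x : Int) - 1), (by omega : b - 1 = -(y : Int) - 1),
        pv_bxor_compl]
      exact PySem.Int.bxor_natCast x y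
    rw [hbx]
    exact pv_max_cast _
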